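-- pv_equiv track=rewrite | github.com/leomet07/mykolyk_intro | mouz/hw24.py | invert_string
-- ===== SOURCE A (Python) =====
-- def invert_string(s : str):
--     inverted = ""
--
--     for char in s:
--         ascii_code = ord(char)
--         if ascii_code >= 65 and ascii_code <= 90:
--             inverted += chr(ascii_code + 32)
--         elif ascii_code >= 97 and ascii_code <= 122:
--             inverted += chr(ascii_code - 32)
--
--     return inverted
-- ===== SOURCE B (Python) =====
-- def invert_string(s : str):
--     letters = ''.join(c for c in s if c.isascii() and c.isalpha())
--     return letters.swapcase()
-- ===== Notes on version B (the rewrite author's own statement) =====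
-- stated objective: simpler
-- what changed: Replaced the single per-char ord-arithmetic accumulator loop with a two-phase decomposition: filter to ASCII letters, then swapcase the filtered string.
import Mathlib
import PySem

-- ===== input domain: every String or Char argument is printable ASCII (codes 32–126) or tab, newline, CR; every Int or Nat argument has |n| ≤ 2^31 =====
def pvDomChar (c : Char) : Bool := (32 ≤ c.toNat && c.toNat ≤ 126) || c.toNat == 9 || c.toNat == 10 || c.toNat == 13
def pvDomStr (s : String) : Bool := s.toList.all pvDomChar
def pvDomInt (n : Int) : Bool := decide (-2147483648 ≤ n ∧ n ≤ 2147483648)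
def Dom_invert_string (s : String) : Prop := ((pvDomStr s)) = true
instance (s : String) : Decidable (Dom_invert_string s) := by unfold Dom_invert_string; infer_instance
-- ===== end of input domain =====

-- B changes the decomposition only: filter to ASCII letters first, then swapcase the result
-- (same O(n) cost; the per-character ord arithmetic of A disappears).

-- ===== PORT A =====
-- literal port of A: one left fold over the characters, appending to the accumulator
def invert_string (s : String) : String :=
  String.mk (s.toList.foldl (fun inverted char =>
    let ascii_code := char.toNat
    if 65 ≤ ascii_code ∧ ascii_code ≤ 90 then inverted ++ [Char.ofNat (ascii_code + 32)]
    else if 97 ≤ ascii_code ∧ ascii_code ≤ 122 then inverted ++ [Char.ofNat (ascii_code - 32)]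
    else inverted) [])

-- ===== PORT B =====
-- per-character swapcase, as Python's str.swapcase acts on an ASCII character
def pySwapChar (c : Char) : Char :=
  if PySem.Chars.isupper c then PySem.Chars.lowerChar c
  else if PySem.Chars.islower c then PySem.Chars.upperChar c
  else c

-- port of B: filter to ASCII letters (c.isascii() and c.isalpha()), then swapcase
def invert_string_alt (s : String) : String :=
  String.mk (((s.toList.filter (fun c => c.toNat ≤ 127 && PySem.Chars.isalpha c)).map pySwapChar))

-- ===== PRECONDITION & SPEC =====
def Spec_invert_string (s : String) (out : String) : Prop := out = invert_string_alt s
instance (s : String) (out : String) : Decidable (Spec_invert_string s out) := by unfold Spec_invert_string; infer_instance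

-- ===== CLAIM (what is proved, stated in full; the proofs are below) =====
def Claim_equal_invert_string : Prop := ∀ (s : String), Dom_invert_string s → Spec_invert_string s (invert_string s)

-- ===== LEMMAS AND PROOFS =====

-- A's per-character contribution, factored out of the fold
def stepA (c : Char) : List Char :=
  let a := c.toNat
  if 65 ≤ a ∧ a ≤ 90 then [Char.ofNat (a + 32)]
  else if 97 ≤ a ∧ a ≤ 122 then [Char.ofNat (a - 32)]
  else []

-- B's per-character contribution
def stepB (c : Char) : List Char :=
  if c.toNat ≤ 127 && PySem.Chars.isalpha c then [pySwapChar c] else []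

lemma foldA_eq (l acc : List Char) :
    l.foldl (fun inverted char =>
      let ascii_code := char.toNat
      if 65 ≤ ascii_code ∧ ascii_code ≤ 90 then inverted ++ [Char.ofNat (ascii_code + 32)]
      else if 97 ≤ ascii_code ∧ ascii_code ≤ 122 then inverted ++ [Char.ofNat (ascii_code - 32)]
      else inverted) acc = acc ++ l.flatMap stepA := by
  induction l generalizing acc with
  | nil => simp
  | cons c t ih =>
    simp only [List.foldl_cons, List.flatMap_cons, ih, stepA]
    split_ifs <;> simp

lemma filterMap_eq (l : List Char) :
    (l.filter (fun c => c.toNat ≤ 127 && PySem.Chars.isalpha c)).map pySwapChar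
      = l.flatMap stepB := by
  induction l with
  | nil => rfl
  | cons c t ih =>
    simp only [List.filter_cons, List.flatMap_cons, stepB]
    split_ifs with h <;> simp [ih]

set_option maxRecDepth 4000 in
lemma step_range : ∀ n ∈ List.range 128, stepA (Char.ofNat n) = stepB (Char.ofNat n) := by
  decide

lemma step_eq (c : Char) (h : pvDomChar c = true) : stepA c = stepB c := by
  have hn : c.toNat < 128 := by
    simp only [pvDomChar, Bool.or_eq_true, Bool.and_eq_true, decide_eq_true_eq, beq_iff_eq] at h
    omega
  have := step_range c.toNat (List.mem_range.mpr hn)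
  rwa [Char.ofNat_toNat] at this

lemma flatMap_eq (l : List Char) (h : ∀ c ∈ l, pvDomChar c = true) :
    l.flatMap stepA = l.flatMap stepB := by
  induction l with
  | nil => rfl
  | cons c t ih =>
    simp only [List.flatMap_cons]
    rw [step_eq c (h c (List.mem_cons_self)), ih (fun x hx => h x (List.mem_cons_of_mem _ hx))]

-- ===== VERDICT (by name: the statement is the Claim_ definition above) =====
theorem invert_string_spec : Claim_equal_invert_string := by
  intro s hdom
  unfold Spec_invert_string invert_string invert_string_alt
  rw [foldA_eq, filterMap_eq, List.nil_append,
    flatMap_eq _ (by simpa [Dom_invert_string, pvDomStr, List.all_eq_true] using hdom)]
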